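-- pv_equiv track=rewrite | github.com/gracelefevre/paradigm-shape | MaximallyConfusableSubsets_Deidentified.py | EditDistanceWithAlignment
-- ===== SOURCE A (Python) =====
-- cache = {}
--
-- def EditDistanceWithAlignment(s1, s2, level=0):
--     if(len(s1)==0):
--         return len(s2), set([
--             (tuple(), tuple([(char, False) for char in s2]))
--             ])
--     if(len(s2)==0):
--         return len(s1), set([
--             (tuple([(char, False) for char in s1]), tuple())
--             ])
--     if(s1, s2) in cache:
--         return cache[(s1, s2)]
--
--     if(s1[-1]==s2[-1]):
--         cost = 0
--     else:
--         cost = 2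
--
--     op1, solutions1 = EditDistanceWithAlignment(s1[:-1], s2, level=level + 1)
--     op2, solutions2 = EditDistanceWithAlignment(s1, s2[:-1], level=level + 1)
--     op3, solutions3 = EditDistanceWithAlignment(s1[:-1], s2[:-1], level=level + 1)
--
--     op1 += 1
--     op2 += 1
--     op3 += cost
--
--     solutions = set()
--     mincost = min(op1, op2, op3)
--
--     if op1==mincost:
--         for (sol1, sol2) in solutions1:
--             solutions.add( (sol1 + ((s1[-1], False),), sol2) )
--     if op2==mincost:
--         for (sol1, sol2) in solutions2:
--             solutions.add( (sol1, sol2 + ((s2[-1], False),)) )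
--     if op3==mincost and cost==0:
--         for (sol1, sol2) in solutions3:
--             solutions.add( (sol1 + ((s1[-1], True),), sol2 + ((s2[-1], True),)) )
--     if op3==mincost and cost>0:
--         for (sol1, sol2) in solutions3:
--             solutions.add( (sol1 + ((s1[-1], False),), sol2 + ((s2[-1], False),)) )
--     cache[(s1, s2)] = (mincost, solutions)
--
--     return mincost, solutions
-- ===== SOURCE B (Python) =====
-- def _combine(up, left, diag, a, b):
--     cost = 0 if a == b else 2
--     op1 = up[0] + 1
--     op2 = left[0] + 1
--     op3 = diag[0] + cost
--     m = min(op1, op2, op3)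
--     sols = set()
--     if op1 == m:
--         for (x, y) in up[1]:
--             sols.add((x + ((a, False),), y))
--     if op2 == m:
--         for (x, y) in left[1]:
--             sols.add((x, y + ((b, False),)))
--     if op3 == m and cost == 0:
--         for (x, y) in diag[1]:
--             sols.add((x + ((a, True),), y + ((b, True),)))
--     if op3 == m and cost > 0:
--         for (x, y) in diag[1]:
--             sols.add((x + ((a, False),), y + ((b, False),)))
--     return m, sols
--
-- def EditDistanceWithAlignment(s1, s2, level=0):
--     # bottom-up DP over prefixes; row[j] is the answer for (s1[:i], s2[:j])
--     row = [(0, {((), ())})]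
--     al = ()
--     for b in s2:
--         al = al + ((b, False),)
--         row.append((len(al), {((), al)}))
--     al = ()
--     for a in s1:
--         al = al + ((a, False),)
--         cur = (len(al), {(al, ())})
--         new = [cur]
--         for b, up_left, up in zip(s2, row, row[1:]):
--             cur = _combine(up, cur, up_left, a, b)
--             new.append(cur)
--         row = new
--     return row[-1]
-- ===== Notes on version B (the rewrite author's own statement) =====
-- stated objective: alternative
-- what changed: Replaces A's top-down recursion on the last characters (with a global memo cache) by an iterative bottom-up DP that fills rows of (cost, alignment-set) cells over prefix lengths; equivalence is about the return value only (A also fills a module-level cache, which never changes any returned value).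
import Mathlib
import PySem

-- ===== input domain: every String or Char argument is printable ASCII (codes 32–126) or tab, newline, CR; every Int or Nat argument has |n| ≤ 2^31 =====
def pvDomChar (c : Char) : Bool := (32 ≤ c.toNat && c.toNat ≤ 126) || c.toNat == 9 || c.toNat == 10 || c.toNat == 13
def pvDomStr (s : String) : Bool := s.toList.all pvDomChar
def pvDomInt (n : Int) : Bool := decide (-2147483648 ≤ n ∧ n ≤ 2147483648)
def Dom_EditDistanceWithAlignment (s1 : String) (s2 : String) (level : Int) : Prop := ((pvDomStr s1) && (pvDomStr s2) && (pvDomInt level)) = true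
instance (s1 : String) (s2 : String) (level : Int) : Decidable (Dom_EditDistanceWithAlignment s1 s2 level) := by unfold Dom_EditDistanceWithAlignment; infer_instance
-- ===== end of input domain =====

-- B replaces A's top-down memoized recursion by a bottom-up DP over prefix rows (alternative
-- decomposition, same asymptotic cost).  A's global memo cache is ported as an explicitly
-- threaded parameter (it never changes any returned value).

abbrev PVAl := List (String × Bool)
abbrev PVCell := Int × List (PVAl × PVAl)

-- ===== PORT A =====
-- top-down recursion on the LAST characters, with the memo cache threaded through
def pvEdA (cache : PySem.Dict (List Char × List Char) PVCell) (l1 l2 : List Char)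
    (level : Int) : PVCell × PySem.Dict (List Char × List Char) PVCell :=
  if h1 : l1 = [] then
    (((l2.length : Int), [([], l2.map (fun c => (c.toString, false)))]), cache)
  else if h2 : l2 = [] then
    (((l1.length : Int), [(l1.map (fun c => (c.toString, false)), [])]), cache)
  else
    match cache.get? (l1, l2) with
    | some v => (v, cache)
    | none =>
      let a := l1.getLast h1
      let b := l2.getLast h2
      let cost : Int := if a = b then 0 else 2
      let p1 := pvEdA cache l1.dropLast l2 (level + 1)
      let p2 := pvEdA p1.2 l1 l2.dropLast (level + 1)
      let p3 := pvEdA p2.2 l1.dropLast l2.dropLast (level + 1)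
      let op1 := p1.1.1 + 1
      let op2 := p2.1.1 + 1
      let op3 := p3.1.1 + cost
      let mincost := min (min op1 op2) op3
      let sols0 : List (PVAl × PVAl) := PySem.Set.empty
      let sols1 := if op1 = mincost then
          p1.1.2.foldl (fun s q => PySem.Set.add s (q.1 ++ [(a.toString, false)], q.2)) sols0
        else sols0
      let sols2 := if op2 = mincost then
          p2.1.2.foldl (fun s q => PySem.Set.add s (q.1, q.2 ++ [(b.toString, false)])) sols1
        else sols1
      let sols3 := if op3 = mincost ∧ cost = 0 then
          p3.1.2.foldl (fun s q => PySem.Set.add s (q.1 ++ [(a.toString, true)], q.2 ++ [(b.toString, true)])) sols2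
        else sols2
      let sols4 := if op3 = mincost ∧ cost > 0 then
          p3.1.2.foldl (fun s q => PySem.Set.add s (q.1 ++ [(a.toString, false)], q.2 ++ [(b.toString, false)])) sols3
        else sols3
      ((mincost, sols4), p3.2.insert (l1, l2) (mincost, sols4))
termination_by l1.length + l2.length
decreasing_by
  · have := List.length_pos_iff.mpr h1; simp [List.length_dropLast]; omega
  · have := List.length_pos_iff.mpr h2; simp [List.length_dropLast]; omega
  · have := List.length_pos_iff.mpr h1; have := List.length_pos_iff.mpr h2
    simp [List.length_dropLast]; omega

def EditDistanceWithAlignment (s1 : String) (s2 : String) (level : Int) : Int × (List ((List (String × Bool)) × (List (String × Bool)))) :=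
  (pvEdA PySem.Dict.empty s1.toList s2.toList level).1

-- ===== PORT B =====
-- one DP cell from its three neighbours (B's helper _combine)
def pvCombine (up left diag : PVCell) (a b : Char) : PVCell :=
  let cost : Int := if a = b then 0 else 2
  let op1 := up.1 + 1
  let op2 := left.1 + 1
  let op3 := diag.1 + cost
  let m := min (min op1 op2) op3
  let sols0 : List (PVAl × PVAl) := PySem.Set.empty
  let sols1 := if op1 = m then
      up.2.foldl (fun s q => PySem.Set.add s (q.1 ++ [(a.toString, false)], q.2)) sols0
    else sols0
  let sols2 := if op2 = m then
      left.2.foldl (fun s q => PySem.Set.add s (q.1, q.2 ++ [(b.toString, false)])) sols1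
    else sols1
  let sols3 := if op3 = m ∧ cost = 0 then
      diag.2.foldl (fun s q => PySem.Set.add s (q.1 ++ [(a.toString, true)], q.2 ++ [(b.toString, true)])) sols2
    else sols2
  let sols4 := if op3 = m ∧ cost > 0 then
      diag.2.foldl (fun s q => PySem.Set.add s (q.1 ++ [(a.toString, false)], q.2 ++ [(b.toString, false)])) sols3
    else sols3
  (m, sols4)

-- row 0 of the table (the 'for b in s2' loop)
def pvRow0 (al : PVAl) : List Char → List PVCell
  | [] => []
  | b :: rest =>
    let al' := al ++ [(b.toString, false)]
    ((al'.length : Int), [([], al')]) :: pvRow0 al' rest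

-- the inner 'for b, up_left, up in zip(s2, row, row[1:])' loop
def pvInner (a : Char) : PVCell → List (Char × (PVCell × PVCell)) → List PVCell
  | _, [] => []
  | cur, (b, pr) :: rest =>
    let c := pvCombine pr.2 cur pr.1 a b
    c :: pvInner a c rest

-- the outer 'for a in s1' loop
def pvRows (l2 : List Char) : PVAl → List PVCell → List Char → List PVCell
  | _, row, [] => row
  | al, row, a :: rest =>
    let al' := al ++ [(a.toString, false)]
    let cur0 : PVCell := ((al'.length : Int), [(al', [])])
    let new := cur0 :: pvInner a cur0 (l2.zip (row.zip (row.drop 1)))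
    pvRows l2 al' new rest

def EditDistanceWithAlignment_alt (s1 : String) (s2 : String) (level : Int) : Int × (List ((List (String × Bool)) × (List (String × Bool)))) :=
  let l2 := s2.toList
  let row := ((0 : Int), [(([] : PVAl), ([] : PVAl))]) :: pvRow0 [] l2
  ((pvRows l2 [] row s1.toList).getLast?).getD (0, [])

-- ===== PRECONDITION & SPEC =====
def Spec_EditDistanceWithAlignment (s1 : String) (s2 : String) (level : Int) (out : Int × (List ((List (String × Bool)) × (List (String × Bool))))) : Prop := out = EditDistanceWithAlignment_alt s1 s2 level
instance (s1 : String) (s2 : String) (level : Int) (out : Int × (List ((List (String × Bool)) × (List (String × Bool))))) : Decidable (Spec_EditDistanceWithAlignment s1 s2 level out) := by unfold Spec_EditDistanceWithAlignment; infer_instance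

-- ===== CLAIM (what is proved, stated in full; the proofs are below) =====
def Claim_equal_EditDistanceWithAlignment : Prop := ∀ (s1 : String) (s2 : String) (level : Int), Dom_EditDistanceWithAlignment s1 s2 level → Spec_EditDistanceWithAlignment s1 s2 level (EditDistanceWithAlignment s1 s2 level)

-- ===== LEMMAS AND PROOFS =====

-- cache-free reference recursion (proof-side only)
def pvEdP (l1 l2 : List Char) : PVCell :=
  if h1 : l1 = [] then ((l2.length : Int), [([], l2.map (fun c => (c.toString, false)))])
  else if h2 : l2 = [] then ((l1.length : Int), [(l1.map (fun c => (c.toString, false)), [])])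
  else
    pvCombine (pvEdP l1.dropLast l2) (pvEdP l1 l2.dropLast) (pvEdP l1.dropLast l2.dropLast)
      (l1.getLast h1) (l2.getLast h2)
termination_by l1.length + l2.length
decreasing_by
  · have := List.length_pos_iff.mpr h1; simp [List.length_dropLast]; omega
  · have := List.length_pos_iff.mpr h2; simp [List.length_dropLast]; omega
  · have := List.length_pos_iff.mpr h1; have := List.length_pos_iff.mpr h2
    simp [List.length_dropLast]; omega

def pvSound (c : PySem.Dict (List Char × List Char) PVCell) : Prop :=
  ∀ k v, c.get? k = some v → v = pvEdP k.1 k.2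

theorem pvEdP_nil_left (l2 : List Char) :
    pvEdP [] l2 = ((l2.length : Int), [([], l2.map (fun c => (c.toString, false)))]) := by
  rw [pvEdP]; simp

theorem pvEdP_concat_nil (xs : List Char) (a : Char) :
    pvEdP (xs ++ [a]) [] = (((xs ++ [a]).length : Int), [((xs ++ [a]).map (fun c => (c.toString, false)), [])]) := by
  rw [pvEdP]; simp

theorem pvEdP_step (l1 l2 : List Char) (h1 : l1 ≠ []) (h2 : l2 ≠ []) :
    pvEdP l1 l2 = pvCombine (pvEdP l1.dropLast l2) (pvEdP l1 l2.dropLast)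
      (pvEdP l1.dropLast l2.dropLast) (l1.getLast h1) (l2.getLast h2) := by
  rw [pvEdP]; simp [h1, h2]

theorem pvEdA_correct (c : PySem.Dict (List Char × List Char) PVCell) (l1 l2 : List Char)
    (level : Int) (hc : pvSound c) :
    (pvEdA c l1 l2 level).1 = pvEdP l1 l2 ∧ pvSound (pvEdA c l1 l2 level).2 := by
  fun_induction pvEdA c l1 l2 level with
  | case1 cache l2 hc =>
    exact ⟨by rw [pvEdP_nil_left], hc⟩
  | case2 cache l1 hc h =>
    refine ⟨?_, hc⟩
    rw [pvEdP]; simp [h]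
  | case3 cache l1 l2 hc h1 h2 v hv =>
    exact ⟨(hc (l1, l2) v hv).symm ▸ rfl, hc⟩
  | case4 cache l1 l2 hc h1 h2 hnone a b cost p1 p2 p3 op1 op2 op3 mincost sols0 sols1 sols2 sols3 sols4 ih4 ih3 ih2 ih1 =>
    obtain ⟨hv1, hs1⟩ := ih4 hc
    obtain ⟨hv2, hs2⟩ := ih3 hs1
    obtain ⟨hv3, hs3⟩ := ih1 hs2
    have e1 : p1.1 = pvEdP l1.dropLast l2 := hv1
    have e2 : p2.1 = pvEdP l1 l2.dropLast := hv2
    have e3 : p3.1 = pvEdP l1.dropLast l2.dropLast := hv3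
    have hval : (mincost, sols4) = pvEdP l1 l2 := by
      have hdef : (mincost, sols4) = pvCombine p1.1 p2.1 p3.1 a b := rfl
      rw [hdef, e1, e2, e3, pvEdP_step l1 l2 h1 h2]
    refine ⟨hval, ?_⟩
    intro k v hk
    rw [PySem.Dict.get?_insert] at hk
    by_cases hkk : k = (l1, l2)
    · rw [if_pos hkk] at hk
      cases hk
      rw [hkk]
      exact hval
    · rw [if_neg hkk] at hk
      exact hs3 k v hk

theorem pvEdP_concat (xs ys : List Char) (a b : Char) :
    pvEdP (xs ++ [a]) (ys ++ [b]) =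
      pvCombine (pvEdP xs (ys ++ [b])) (pvEdP (xs ++ [a]) ys) (pvEdP xs ys) a b := by
  rw [pvEdP]; simp

def pvSpecRow (p : List Char) : List Char → List Char → List PVCell
  | _, [] => []
  | done, b :: rest => pvEdP p (done ++ [b]) :: pvSpecRow p (done ++ [b]) rest

theorem pvRow0_spec (rest : List Char) : ∀ done : List Char,
    pvRow0 (done.map (fun c => (c.toString, false))) rest = pvSpecRow [] done rest := by
  induction rest with
  | nil => intro done; rfl
  | cons b rs ih =>
    intro done
    show _ :: pvRow0 _ rs = pvEdP [] (done ++ [b]) :: pvSpecRow [] (done ++ [b]) rs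
    rw [pvEdP_nil_left]
    have h1 : done.map (fun c => (c.toString, false)) ++ [(b.toString, false)]
        = (done ++ [b]).map (fun c => (c.toString, false)) := by simp
    have h2 := ih (done ++ [b])
    simp only [h1, h2, List.length_map]

theorem pvInner_spec (p : List Char) (a : Char) (rest : List Char) : ∀ done : List Char,
    pvInner a (pvEdP (p ++ [a]) done)
      (rest.zip ((pvEdP p done :: pvSpecRow p done rest).zip (pvSpecRow p done rest)))
    = pvSpecRow (p ++ [a]) done rest := by
  induction rest with
  | nil => intro done; rfl
  | cons b rs ih =>
    intro done
    show pvInner a (pvEdP (p ++ [a]) done)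
        ((b, (pvEdP p done, pvEdP p (done ++ [b]))) ::
          (rs.zip ((pvEdP p (done ++ [b]) :: pvSpecRow p (done ++ [b]) rs).zip
            (pvSpecRow p (done ++ [b]) rs)))) = _
    rw [pvInner]
    have hc : pvCombine (pvEdP p (done ++ [b])) (pvEdP (p ++ [a]) done) (pvEdP p done) a b
        = pvEdP (p ++ [a]) (done ++ [b]) := (pvEdP_concat p done a b).symm
    simp only [hc, ih (done ++ [b])]
    rfl

theorem pvRows_spec (l2 : List Char) (rest : List Char) : ∀ p : List Char,
    pvRows l2 (p.map (fun c => (c.toString, false))) (pvEdP p [] :: pvSpecRow p [] l2) rest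
    = pvEdP (p ++ rest) [] :: pvSpecRow (p ++ rest) [] l2 := by
  induction rest with
  | nil => intro p; simp [pvRows]
  | cons a rs ih =>
    intro p
    rw [pvRows]
    have h1 : p.map (fun c => (c.toString, false)) ++ [(a.toString, false)]
        = (p ++ [a]).map (fun c => (c.toString, false)) := by simp
    have h0 : (((p.map (fun c => (c.toString, false)) ++ [(a.toString, false)]).length : Int),
        [((p.map (fun c => (c.toString, false)) ++ [(a.toString, false)]), ([] : PVAl))])
        = pvEdP (p ++ [a]) [] := by
      rw [pvEdP_concat_nil]; simp
    have hz : ((pvEdP p [] :: pvSpecRow p [] l2).zip ((pvEdP p [] :: pvSpecRow p [] l2).drop 1))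
        = ((pvEdP p [] :: pvSpecRow p [] l2).zip (pvSpecRow p [] l2)) := rfl
    simp only [h0, hz, pvInner_spec p a l2 []]
    have := ih (p ++ [a])
    simp only [h1] at this ⊢
    rw [this, List.append_assoc]
    rfl

theorem pvSpecRow_last (p : List Char) (rest : List Char) : ∀ (done : List Char) (x : PVCell),
    (x :: pvSpecRow p done rest).getLast?
      = some (if rest = [] then x else pvEdP p (done ++ rest)) := by
  induction rest with
  | nil => intro done x; rfl
  | cons b rs ih =>
    intro done x
    show (x :: pvEdP p (done ++ [b]) :: pvSpecRow p (done ++ [b]) rs).getLast? = _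
    rw [List.getLast?_cons_cons, ih (done ++ [b]) (pvEdP p (done ++ [b]))]
    cases rs with
    | nil => simp
    | cons c cs => simp

theorem pvAlt_eq (s1 s2 : String) (level : Int) :
    EditDistanceWithAlignment_alt s1 s2 level = pvEdP s1.toList s2.toList := by
  unfold EditDistanceWithAlignment_alt
  have h0 : ((0 : Int), [(([] : PVAl), ([] : PVAl))]) = pvEdP [] [] := by
    rw [pvEdP_nil_left]; rfl
  have hr0 : pvRow0 [] s2.toList = pvSpecRow [] [] s2.toList := pvRow0_spec s2.toList []
  simp only [h0, hr0]
  have hrows := pvRows_spec s2.toList s1.toList []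
  simp only [List.map_nil, List.nil_append] at hrows
  rw [hrows, pvSpecRow_last]
  cases s2.toList with
  | nil => simp
  | cons b bs => simp

-- ===== VERDICT (by name: the statement is the Claim_ definition above) =====
theorem EditDistanceWithAlignment_spec : Claim_equal_EditDistanceWithAlignment := by
  intro s1 s2 level _
  unfold Spec_EditDistanceWithAlignment EditDistanceWithAlignment
  have hsound : pvSound PySem.Dict.empty := by
    intro k v h; simp [PySem.Dict.get?_empty] at h
  rw [(pvEdA_correct PySem.Dict.empty s1.toList s2.toList level hsound).1, pvAlt_eq]
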